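-- pv_equiv track=rewrite | github.com/TamProVip/Sources-AOV-Tool | AutoModIn1.py | insert_blocks_before_action_close
-- ===== SOURCE A (Python) =====
-- def insert_blocks_before_action_close(xml_content, blocks):
--     lines = xml_content.splitlines()
--     output = []
--     inserted = False
--     for line in lines:
--         if not inserted and line.strip() == '</Action>':
--             for block in blocks:
--                 output.extend(block.splitlines())
--             inserted = True
--         output.append(line)
--     return '\n'.join(output)
-- ===== SOURCE B (Python) =====
-- def insert_blocks_before_action_close(xml_content, blocks):
--     lines = xml_content.splitlines()
--     idx = next((i for i, l in enumerate(lines) if l.strip() == '</Action>'), None)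
--     if idx is None:
--         return '\n'.join(lines)
--     flat = [bl for block in blocks for bl in block.splitlines()]
--     return '\n'.join(lines[:idx] + flat + lines[idx:])
-- ===== Notes on version B (the rewrite author's own statement) =====
-- stated objective: idiomatic
-- what changed: Replaces the single-pass accumulator-with-inserted-flag by locate-then-splice: find the index of the first line whose strip is '</Action>', then join lines[:idx] + flattened blocks + lines[idx:].
import Mathlib
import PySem

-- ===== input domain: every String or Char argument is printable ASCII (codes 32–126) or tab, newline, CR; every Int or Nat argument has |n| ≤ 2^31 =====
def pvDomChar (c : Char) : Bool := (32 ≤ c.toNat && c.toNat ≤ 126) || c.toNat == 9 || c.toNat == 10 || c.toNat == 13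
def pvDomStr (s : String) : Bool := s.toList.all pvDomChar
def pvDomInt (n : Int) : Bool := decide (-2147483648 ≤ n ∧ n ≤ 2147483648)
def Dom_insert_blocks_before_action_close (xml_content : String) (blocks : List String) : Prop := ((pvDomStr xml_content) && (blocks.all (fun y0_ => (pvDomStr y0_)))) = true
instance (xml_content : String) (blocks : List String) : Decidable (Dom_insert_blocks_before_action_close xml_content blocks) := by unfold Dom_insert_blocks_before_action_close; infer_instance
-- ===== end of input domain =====

-- B replaces A's single-pass accumulator-with-flag by locate-then-splice (find first '</Action>' line, then slice and concatenate); objective: idiomatic.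

-- ===== PORT A =====
-- A's loop over lines with the (output, inserted) state; output is built by structural recursion.
def pvLoopA (blocks : List String) : List String → Bool → List String
  | [], _ => []
  | l :: ls, inserted =>
    if !inserted && (PySem.Str.strip l == "</Action>") then
      blocks.flatMap PySem.Str.splitlines ++ (l :: pvLoopA blocks ls true)
    else
      l :: pvLoopA blocks ls inserted

def insert_blocks_before_action_close (xml_content : String) (blocks : List String) : String :=
  PySem.Str.join "\n" (pvLoopA blocks (PySem.Str.splitlines xml_content) false)

-- ===== PORT B =====
def insert_blocks_before_action_close_alt (xml_content : String) (blocks : List String) : String :=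
  let lines := PySem.Str.splitlines xml_content
  match lines.findIdx? (fun l => PySem.Str.strip l == "</Action>") with
  | none => PySem.Str.join "\n" lines
  | some i =>
      let flat := blocks.flatMap PySem.Str.splitlines
      PySem.Str.join "\n" (lines.take i ++ flat ++ lines.drop i)

-- ===== PRECONDITION & SPEC =====
def Spec_insert_blocks_before_action_close (xml_content : String) (blocks : List String) (out : String) : Prop := out = insert_blocks_before_action_close_alt xml_content blocks
instance (xml_content : String) (blocks : List String) (out : String) : Decidable (Spec_insert_blocks_before_action_close xml_content blocks out) := by unfold Spec_insert_blocks_before_action_close; infer_instance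

-- ===== CLAIM (what is proved, stated in full; the proofs are below) =====
def Claim_equal_insert_blocks_before_action_close : Prop := ∀ (xml_content : String) (blocks : List String), Dom_insert_blocks_before_action_close xml_content blocks → Spec_insert_blocks_before_action_close xml_content blocks (insert_blocks_before_action_close xml_content blocks)

-- ===== LEMMAS AND PROOFS =====
theorem pvLoopA_true (blocks : List String) (ls : List String) :
    pvLoopA blocks ls true = ls := by
  induction ls with
  | nil => rfl
  | cons l ls ih => simp [pvLoopA, ih]

theorem pvLoopA_false (blocks : List String) (ls : List String) :
    pvLoopA blocks ls false =
      match ls.findIdx? (fun l => PySem.Str.strip l == "</Action>") with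
      | none => ls
      | some i => ls.take i ++ blocks.flatMap PySem.Str.splitlines ++ ls.drop i := by
  induction ls with
  | nil => rfl
  | cons l ls ih =>
    by_cases h : (PySem.Str.strip l == "</Action>") = true
    · simp [pvLoopA, h, List.findIdx?_cons, pvLoopA_true]
    · simp only [pvLoopA, Bool.not_false, Bool.true_and, h, if_neg, Bool.false_eq_true,
        not_false_eq_true, ih, List.findIdx?_cons]
      cases hf : ls.findIdx? (fun l => PySem.Str.strip l == "</Action>") with
      | none => simp [h, hf]
      | some i => simp [h, hf]

-- ===== VERDICT (by name: the statement is the Claim_ definition above) =====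
theorem insert_blocks_before_action_close_spec : Claim_equal_insert_blocks_before_action_close := by
  intro xml_content blocks _
  unfold Spec_insert_blocks_before_action_close insert_blocks_before_action_close insert_blocks_before_action_close_alt
  rw [pvLoopA_false]
  cases hf : (PySem.Str.splitlines xml_content).findIdx? (fun l => PySem.Str.strip l == "</Action>") <;>
    simp [hf]
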